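-- pv_equiv track=rewrite | github.com/IorenzoLF/Le_Refuge | Le_refuge/arc_agi_refuge/resoudre_puzzle_4_simple.py | appliquer_pattern
-- ===== SOURCE A (Python) =====
-- def appliquer_pattern(input_grid, pattern):
--     """Appliquer pattern"""
--     solution = [row[:] for row in input_grid]
--
--     for x, y, couleur in pattern['positions_nouvelles']:
--         if (0 <= x < len(input_grid) and
--             0 <= y < len(input_grid[0]) and
--             input_grid[x][y] == 0):
--             solution[x][y] = couleur
--
--     return solution
-- ===== SOURCE B (Python) =====
-- def appliquer_pattern(input_grid, pattern):
--     """Appliquer pattern (index-based rewrite: build a position->colour dict, then scan the grid)"""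
--     updates = {}
--     for x, y, couleur in pattern['positions_nouvelles']:
--         updates[(x, y)] = couleur
--
--     c0 = len(input_grid[0]) if input_grid else 0
--
--     return [
--         [updates[(i, j)] if ((i, j) in updates and j < c0 and v == 0) else v
--          for j, v in enumerate(row)]
--         for i, row in enumerate(input_grid)
--     ]
-- ===== Notes on version B (the rewrite author's own statement) =====
-- stated objective: alternative
-- what changed: Instead of copying the grid and writing each pattern position into the copy, B builds a (x,y)->colour dict from the pattern (last write wins) and then produces the output by scanning the grid cell by cell, consulting the index.
-- crash fix: On jagged grids where some pattern position (x,y) passes the bounds checks (0<=x<len(grid), 0<=y<len(grid[0])) but row x is shorter than y+1, A raises IndexError while B returns the grid with the reachable updates applied; Pre_ also excludes patterns missing the 'positions_nouvelles' key, where both raise KeyError. — e.g. on appliquer_pattern([[0, 0], [0]], [("positions_nouvelles", [(1, 1, 5)])]): A raises IndexError, B returns [[0, 0], [0]]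
import Mathlib
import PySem

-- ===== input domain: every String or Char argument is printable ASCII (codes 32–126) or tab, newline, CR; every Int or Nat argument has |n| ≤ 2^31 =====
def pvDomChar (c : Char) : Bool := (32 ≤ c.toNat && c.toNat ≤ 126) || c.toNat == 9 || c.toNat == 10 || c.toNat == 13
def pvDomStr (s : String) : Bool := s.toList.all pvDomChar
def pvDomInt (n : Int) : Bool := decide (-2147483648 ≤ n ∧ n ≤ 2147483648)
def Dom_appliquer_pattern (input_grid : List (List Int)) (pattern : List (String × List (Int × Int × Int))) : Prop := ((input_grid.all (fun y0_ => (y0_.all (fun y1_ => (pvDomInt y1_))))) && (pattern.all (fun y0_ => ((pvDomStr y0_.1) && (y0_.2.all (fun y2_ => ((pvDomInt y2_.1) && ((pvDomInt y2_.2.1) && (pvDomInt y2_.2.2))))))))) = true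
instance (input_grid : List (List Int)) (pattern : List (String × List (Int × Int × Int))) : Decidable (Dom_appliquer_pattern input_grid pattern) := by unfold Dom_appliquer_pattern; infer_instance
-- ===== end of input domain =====

-- B replaces A's "write each pattern position into a grid copy" by "index the pattern in a dict,
-- then rebuild the grid cell by cell consulting the index" (alternative decomposition, same cost).
-- Return-value equivalence only: A mutates its local copy, neither function mutates its arguments.

-- ===== PORT A =====
-- one step of A's loop body (sol is the mutable copy; the input grid g is only read)
def pvStepA (g : List (List Int)) (sol : List (List Int)) (e : Int × Int × Int) : List (List Int) :=
  if 0 ≤ e.1 ∧ e.1 < (g.length : Int) ∧ 0 ≤ e.2.1 ∧ e.2.1 < ((g.headD []).length : Int)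
       ∧ (g.getD e.1.toNat []).getD e.2.1.toNat 1 = 0
  then sol.set e.1.toNat ((sol.getD e.1.toNat []).set e.2.1.toNat e.2.2)
  else sol

def appliquer_pattern (input_grid : List (List Int)) (pattern : List (String × List (Int × Int × Int))) : List (List Int) :=
  -- pattern['positions_nouvelles']: dict lookup = first match; none = KeyError (outside Pre_)
  match pattern.find? (fun p => p.1 == "positions_nouvelles") with
  | none => input_grid
  | some pr =>
    -- solution = [row[:] for row in input_grid]: a value-identical copy, i.e. input_grid itself
    pr.2.foldl (pvStepA input_grid) input_grid

-- ===== PORT B =====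
-- one cell of Source B's inner comprehension, consulting the dict index (i = row index, q = (j, v))
def pvCell (d : PySem.Dict (Int × Int) Int) (c0 i : Int) (q : Int × Int) : Int :=
  match d.get? (i, q.1) with
  | some c => if q.1 < c0 ∧ q.2 = 0 then c else q.2
  | none => q.2

-- Source B's nested comprehension over enumerate(input_grid) / enumerate(row)
def pvApplyD (d : PySem.Dict (Int × Int) Int) (c0 : Int) (g : List (List Int)) : List (List Int) :=
  (PySem.List.enumerate g).map (fun (pr : Int × List Int) =>
    (PySem.List.enumerate pr.2).map (pvCell d c0 pr.1))

def appliquer_pattern_alt (input_grid : List (List Int)) (pattern : List (String × List (Int × Int × Int))) : List (List Int) :=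
  match pattern.find? (fun p => p.1 == "positions_nouvelles") with
  | none => input_grid
  | some pr =>
    let updates := pr.2.foldl (fun (d : PySem.Dict (Int × Int) Int) (e : Int × Int × Int) =>
      d.insert (e.1, e.2.1) e.2.2) PySem.Dict.empty
    let c0 : Int := ((input_grid.headD []).length : Int)  -- len(input_grid[0]) if input_grid else 0
    pvApplyD updates c0 input_grid

-- ===== PRECONDITION & SPEC =====
-- Pre_ excludes exactly the inputs where A raises: a missing 'positions_nouvelles' key (KeyError,
-- B raises too) and jagged grids where an in-bounds pattern position (x,y) has y beyond the end of
-- row x (IndexError in A's cell read).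
def Pre_appliquer_pattern (input_grid : List (List Int)) (pattern : List (String × List (Int × Int × Int))) : Prop :=
  (pattern.find? (fun p => p.1 == "positions_nouvelles")).isSome = true ∧
  ∀ e ∈ ((pattern.find? (fun p => p.1 == "positions_nouvelles")).map Prod.snd).getD [],
    (0 ≤ e.1 ∧ e.1 < (input_grid.length : Int) ∧ 0 ≤ e.2.1 ∧ e.2.1 < ((input_grid.headD []).length : Int)) →
    e.2.1 < ((input_grid.getD e.1.toNat []).length : Int)
instance (input_grid : List (List Int)) (pattern : List (String × List (Int × Int × Int))) : Decidable (Pre_appliquer_pattern input_grid pattern) := by unfold Pre_appliquer_pattern; infer_instance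

def pvWitness_appliquer_pattern : List (List Int) × (List (String × List (Int × Int × Int))) :=
  ([[0, 0], [1, 0]], [("positions_nouvelles", [(0, 1, 3), (1, 1, 7), (0, 1, 4)])])

-- On jagged grids where some pattern position (x,y) passes A's bounds checks but row x is shorter
-- than y+1, A raises IndexError while B returns the grid with the reachable updates applied
-- (made checkable by the bottom theorem appliquer_pattern_raises).
def Raises_appliquer_pattern (input_grid : List (List Int)) (pattern : List (String × List (Int × Int × Int))) : Prop :=
  (pattern.find? (fun p => p.1 == "positions_nouvelles")).isSome = true ∧
  ∃ e ∈ ((pattern.find? (fun p => p.1 == "positions_nouvelles")).map Prod.snd).getD [],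
    (0 ≤ e.1 ∧ e.1 < (input_grid.length : Int) ∧ 0 ≤ e.2.1 ∧ e.2.1 < ((input_grid.headD []).length : Int)) ∧
    ¬ e.2.1 < ((input_grid.getD e.1.toNat []).length : Int)
instance (input_grid : List (List Int)) (pattern : List (String × List (Int × Int × Int))) : Decidable (Raises_appliquer_pattern input_grid pattern) := by unfold Raises_appliquer_pattern; infer_instance

def pvRaiseWitness_appliquer_pattern : List (List Int) × (List (String × List (Int × Int × Int))) :=
  ([[0, 0], [0]], [("positions_nouvelles", [(1, 1, 5)])])
def pvRaiseWitnessOut_appliquer_pattern : List (List Int) := [[0, 0], [0]]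

def Spec_appliquer_pattern (input_grid : List (List Int)) (pattern : List (String × List (Int × Int × Int))) (out : List (List Int)) : Prop := out = appliquer_pattern_alt input_grid pattern
instance (input_grid : List (List Int)) (pattern : List (String × List (Int × Int × Int))) (out : List (List Int)) : Decidable (Spec_appliquer_pattern input_grid pattern out) := by unfold Spec_appliquer_pattern; infer_instance

-- ===== CLAIM (what is proved, stated in full; the proofs are below) =====
def Claim_equal_appliquer_pattern : Prop := ∀ (input_grid : List (List Int)) (pattern : List (String × List (Int × Int × Int))), Dom_appliquer_pattern input_grid pattern → Pre_appliquer_pattern input_grid pattern → Spec_appliquer_pattern input_grid pattern (appliquer_pattern input_grid pattern)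
def Claim_raises_appliquer_pattern : Prop := (∀ (input_grid : List (List Int)) (pattern : List (String × List (Int × Int × Int))), Dom_appliquer_pattern input_grid pattern → Raises_appliquer_pattern input_grid pattern → ¬ Pre_appliquer_pattern input_grid pattern) ∧ (Dom_appliquer_pattern (pvRaiseWitness_appliquer_pattern.1) (pvRaiseWitness_appliquer_pattern.2) ∧ Raises_appliquer_pattern (pvRaiseWitness_appliquer_pattern.1) (pvRaiseWitness_appliquer_pattern.2) ∧ appliquer_pattern_alt (pvRaiseWitness_appliquer_pattern.1) (pvRaiseWitness_appliquer_pattern.2) = pvRaiseWitnessOut_appliquer_pattern)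

-- ===== LEMMAS AND PROOFS =====

theorem pvApplyD_length (d : PySem.Dict (Int × Int) Int) (c0 : Int) (g : List (List Int)) :
    (pvApplyD d c0 g).length = g.length := by
  simp [pvApplyD, PySem.List.length_enumerate]

theorem pvApplyD_getElem (d : PySem.Dict (Int × Int) Int) (c0 : Int) (g : List (List Int))
    (i : Nat) (hi : i < g.length) :
    (pvApplyD d c0 g)[i]'(by rw [pvApplyD_length]; exact hi) =
      (PySem.List.enumerate g[i]).map (pvCell d c0 (i : Int)) := by
  simp [pvApplyD, PySem.List.getElem_enumerate]

theorem pvApplyD_empty (c0 : Int) (g : List (List Int)) :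
    pvApplyD PySem.Dict.empty c0 g = g := by
  unfold pvApplyD
  calc (PySem.List.enumerate g).map (fun (pr : Int × List Int) =>
          (PySem.List.enumerate pr.2).map (pvCell PySem.Dict.empty c0 pr.1))
      = (PySem.List.enumerate g).map (fun pr => pr.2) := by
        apply List.map_congr_left; intro pr _
        have h2 : pvCell PySem.Dict.empty c0 pr.1 = (fun (q : Int × Int) => q.2) := by
          funext q; simp [pvCell, PySem.Dict.get?_empty]
        rw [h2]; exact PySem.List.map_snd_enumerate pr.2 0
    _ = g := PySem.List.map_snd_enumerate g 0

-- one loop step of A = one dict insertion on B's side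
theorem pvStep_insert (g : List (List Int)) (d : PySem.Dict (Int × Int) Int)
    (e : Int × Int × Int)
    (hsh : (0 ≤ e.1 ∧ e.1 < (g.length : Int) ∧ 0 ≤ e.2.1 ∧ e.2.1 < ((g.headD []).length : Int)) →
           e.2.1 < ((g.getD e.1.toNat []).length : Int)) :
    pvStepA g (pvApplyD d ((g.headD []).length : Int) g) e =
      pvApplyD (d.insert (e.1, e.2.1) e.2.2) ((g.headD []).length : Int) g := by
  obtain ⟨x, y, c⟩ := e
  set c0 : Int := ((g.headD []).length : Int) with hc0
  by_cases hval : 0 ≤ x ∧ x < (g.length : Int) ∧ 0 ≤ y ∧ y < c0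
      ∧ (g.getD x.toNat []).getD y.toNat 1 = 0
  · -- valid entry: A writes cell (x, y); B's inserted key wins there, nothing else changes
    obtain ⟨hx0, hxl, hy0, hyc, hcell⟩ := hval
    have hxn : x.toNat < g.length := by omega
    have hxc : (x.toNat : Int) = x := Int.toNat_of_nonneg hx0
    have hyrow : y < ((g.getD x.toNat []).length : Int) := hsh ⟨hx0, hxl, hy0, hyc⟩
    have hgetd : g.getD x.toNat [] = g[x.toNat] := List.getD_eq_getElem g [] hxn
    have hyn : y.toNat < (g[x.toNat]).length := by rw [hgetd] at hyrow; omega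
    have hyc' : (y.toNat : Int) = y := Int.toNat_of_nonneg hy0
    have hstep : pvStepA g (pvApplyD d c0 g) (x, y, c) =
        (pvApplyD d c0 g).set x.toNat (((pvApplyD d c0 g).getD x.toNat []).set y.toNat c) := by
      simp only [pvStepA]; rw [if_pos ⟨hx0, hxl, hy0, hyc, hcell⟩]
    rw [hstep]
    apply List.ext_getElem
    · simp [pvApplyD_length]
    · intro i hi1 hi2
      have hig : i < g.length := by rw [pvApplyD_length] at hi2; exact hi2
      rw [List.getElem_set]
      by_cases hix : x.toNat = i
      · -- the written row
        subst hix
        rw [if_pos rfl]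
        have hget : (pvApplyD d c0 g).getD x.toNat [] =
            (PySem.List.enumerate g[x.toNat]).map (pvCell d c0 (x.toNat : Int)) := by
          rw [List.getD_eq_getElem _ [] (by rw [pvApplyD_length]; exact hxn)]
          exact pvApplyD_getElem d c0 g x.toNat hxn
        rw [hget, pvApplyD_getElem _ c0 g x.toNat hxn]
        apply List.ext_getElem
        · simp [PySem.List.length_enumerate]
        · intro j hj1 hj2
          have hjg : j < (g[x.toNat]).length := by
            simpa [PySem.List.length_enumerate] using hj2
          rw [List.getElem_set]
          rw [List.getElem_map, List.getElem_map, PySem.List.getElem_enumerate _ _ j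
            (by rw [PySem.List.length_enumerate]; exact hjg)]
          by_cases hjy : y.toNat = j
          · subst hjy
            rw [if_pos rfl]
            have hkey : ((x.toNat : Int), (0 : Int) + (y.toNat : Int)) = (x, y) := by
              rw [hxc]; simp [hyc']
            simp only [pvCell, hkey, PySem.Dict.get?_insert_self]
            have hv : g[x.toNat][y.toNat] = 0 := by
              rw [hgetd, List.getD_eq_getElem _ 1 hyn] at hcell; exact hcell
            rw [if_pos ⟨by simp [hyc']; exact hyc, hv⟩]
          · rw [if_neg hjy]
            have hne : ((x.toNat : Int), (0 : Int) + (j : Int)) ≠ (x, y) := by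
              intro h
              have := congrArg Prod.snd h
              simp at this
              omega
            simp only [pvCell, PySem.Dict.get?_insert_of_ne _ _ hne]
      · -- any other row: the inserted key has a different row index
        rw [if_neg hix, pvApplyD_getElem d c0 g i hig, pvApplyD_getElem _ c0 g i hig]
        apply List.map_congr_left
        intro q _
        have hne : ((i : Int), q.1) ≠ (x, y) := by
          intro h
          have := congrArg Prod.fst h
          simp at this
          omega
        simp only [pvCell, PySem.Dict.get?_insert_of_ne _ _ hne]
  · -- invalid entry: A skips; B's inserted key is never consulted with a true guard
    have hskip : pvStepA g (pvApplyD d c0 g) (x, y, c) = pvApplyD d c0 g := by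
      simp only [pvStepA]; exact if_neg hval
    rw [hskip]
    apply List.ext_getElem
    · simp [pvApplyD_length]
    · intro i hi1 hi2
      have hig : i < g.length := by rw [pvApplyD_length] at hi2; exact hi2
      rw [pvApplyD_getElem d c0 g i hig, pvApplyD_getElem _ c0 g i hig]
      apply List.map_congr_left
      intro q hq
      obtain ⟨k, hk, rfl⟩ := (PySem.List.mem_enumerate_iff _ _ _).1 hq
      by_cases hkey : ((i : Int), ((0 : Int) + (k : Int))) = (x, y)
      · -- the very cell (x, y) exists in the grid: then the guard must be false
        have hxv : x = (i : Int) := (congrArg Prod.fst hkey).symm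
        have hyv : y = (k : Int) := by
          have := congrArg Prod.snd hkey; simpa using this.symm
        have hguard : ¬ (((0 : Int) + (k : Int)) < c0 ∧ g[i][k] = 0) := by
          intro ⟨h1, h2⟩
          apply hval
          refine ⟨by omega, by omega, by omega, by simpa [hyv] using h1, ?_⟩
          have hxt : x.toNat = i := by omega
          have hyt : y.toNat = k := by omega
          rw [hxt, hyt, List.getD_eq_getElem g [] hig, List.getD_eq_getElem _ 1 hk]
          exact h2
        have hcell_any : ∀ d' : PySem.Dict (Int × Int) Int,
            pvCell d' c0 (i : Int) ((0 : Int) + (k : Int), g[i][k]) = g[i][k] := by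
          intro d'
          unfold pvCell
          cases d'.get? ((i : Int), (0 : Int) + (k : Int)) with
          | none => rfl
          | some v => exact if_neg hguard
        rw [hcell_any, hcell_any]
      · simp only [pvCell, PySem.Dict.get?_insert_of_ne _ _ hkey]

theorem pvFold_eq (g : List (List Int)) (ps : List (Int × Int × Int)) :
    ∀ d : PySem.Dict (Int × Int) Int,
    (∀ e ∈ ps, (0 ≤ e.1 ∧ e.1 < (g.length : Int) ∧ 0 ≤ e.2.1 ∧ e.2.1 < ((g.headD []).length : Int)) →
        e.2.1 < ((g.getD e.1.toNat []).length : Int)) →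
    ps.foldl (pvStepA g) (pvApplyD d ((g.headD []).length : Int) g) =
      pvApplyD (ps.foldl (fun (d : PySem.Dict (Int × Int) Int) (e : Int × Int × Int) =>
        d.insert (e.1, e.2.1) e.2.2) d) ((g.headD []).length : Int) g := by
  induction ps with
  | nil => intro d _; rfl
  | cons e ps ih =>
    intro d hsh
    rw [List.foldl_cons, List.foldl_cons, pvStep_insert g d e (hsh e (List.mem_cons_self))]
    exact ih _ (fun e' he' => hsh e' (List.mem_cons_of_mem _ he'))

-- ===== VERDICT (by name: the statement is the Claim_ definition above) =====
theorem appliquer_pattern_spec : Claim_equal_appliquer_pattern := by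
  intro g pat _ hpre
  obtain ⟨hs, hall⟩ := hpre
  unfold Spec_appliquer_pattern appliquer_pattern appliquer_pattern_alt
  obtain ⟨pr, hpr⟩ := Option.isSome_iff_exists.1 hs
  rw [hpr] at hall ⊢
  simp only [Option.map_some, Option.getD_some] at hall
  have h0 := pvFold_eq g pr.2 PySem.Dict.empty hall
  rw [pvApplyD_empty] at h0
  exact h0

@[simp] theorem appliquer_pattern_raises : Claim_raises_appliquer_pattern := by
  unfold Claim_raises_appliquer_pattern
  constructor
  · intro g pat _ hr hp
    obtain ⟨e, he, hb, hbad⟩ := hr.2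
    exact hbad (hp.2 e he hb)
  · exact ⟨by decide, by decide, by decide⟩
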